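-- pv_equiv track=rewrite | github.com/tarun-ainampudi/Python | Prep/Mathprep.py | leftarm
-- ===== SOURCE A (Python) =====
-- def leftarm(list):
--     varlist=list.copy()
--     templist=[]
--     hold=list[0]
--     templist.append(hold)
--     list.pop(0)
--     while len(list)>0:
--         if hold>=list[0]:
--             templist.append(list[0])
--             list.pop(0)
--         elif hold>=list[len(list)-1]:
--             templist.append(list[len(list)-1])
--             list.pop(len(list)-1)
--         else:
--             break
--     if len(varlist)==len(templist):
--         return 1
--     else:
--         return 0
-- ===== SOURCE B (Python) =====
-- def leftarm(list):
--     # return-value equivalent to A: 1 iff the first element is a maximum of the list.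
--     # (A also empties/mutates its argument in place; B does not mutate.)
--     hold = list[0]
--     return 1 if all(x <= hold for x in list) else 0
-- ===== Notes on version B (the rewrite author's own statement) =====
-- stated objective: faster
-- what changed: Replaces A's alternating front/back popping loop (quadratic because each front pop shifts the list) and its templist length bookkeeping by a single linear scan checking that every element is at most the first one; the equivalence is about the return value only (A empties its argument in place, B does not mutate it), and Pre_ excludes the empty list, on which A raises IndexError.
import Mathlib
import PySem

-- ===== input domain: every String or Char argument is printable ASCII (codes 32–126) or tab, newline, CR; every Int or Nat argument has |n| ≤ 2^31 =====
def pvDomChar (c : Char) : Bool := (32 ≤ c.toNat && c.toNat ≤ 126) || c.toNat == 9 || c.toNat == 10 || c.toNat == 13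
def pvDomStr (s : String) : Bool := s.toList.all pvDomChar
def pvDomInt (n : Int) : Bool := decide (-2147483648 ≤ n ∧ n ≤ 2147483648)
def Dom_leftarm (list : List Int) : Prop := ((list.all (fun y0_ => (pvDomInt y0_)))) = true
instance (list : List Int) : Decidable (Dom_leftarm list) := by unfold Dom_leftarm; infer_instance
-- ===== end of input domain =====

-- ===== PORT A =====
-- B replaces A's O(n^2) alternating front/back popping loop by one linear scan; the
-- proved equivalence is about the RETURN value only (Python A empties its argument
-- list in place, B does not mutate it).
-- loop of A: while the list is nonempty: pop front if hold>=front, else pop back if hold>=back, else break.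
-- state: (remaining list, templist); returns both at the end.
def leftarmLoop (hold : Int) : List Int → List Int → List Int × List Int
  | [], tl => ([], tl)
  | a :: l, tl =>
    if hold ≥ a then
      leftarmLoop hold l (tl ++ [a])
    else
      if hold ≥ (a :: l).getLast (by simp) then
        leftarmLoop hold (a :: l).dropLast (tl ++ [(a :: l).getLast (by simp)])
      else (a :: l, tl)
termination_by l _ => l.length
decreasing_by
  · simp
  · simp [List.length_dropLast]

def leftarm (list : List Int) : Int :=
  match list with
  | [] => 0  -- Python raises IndexError reading the first element; excluded by Pre_leftarm
  | hold :: rest =>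
    let r := leftarmLoop hold rest [hold]
    if (hold :: rest).length == r.2.length then 1 else 0

-- ===== PORT B =====
def leftarm_alt (list : List Int) : Int :=
  match list with
  | [] => 0  -- Python raises IndexError reading the first element; excluded by Pre_leftarm
  | hold :: _ =>
    if list.all (fun x => decide (x ≤ hold)) then 1 else 0

-- ===== PRECONDITION & SPEC =====
-- Pre_ excludes only the empty list, on which both Pythons raise IndexError reading the first element.
def Pre_leftarm (list : List Int) : Prop := list ≠ []
instance (list : List Int) : Decidable (Pre_leftarm list) := by unfold Pre_leftarm; infer_instance
def pvWitness_leftarm : List Int := ([3, 1, 2])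
def Spec_leftarm (list : List Int) (out : Int) : Prop := out = leftarm_alt list
instance (list : List Int) (out : Int) : Decidable (Spec_leftarm list out) := by unfold Spec_leftarm; infer_instance

-- ===== CLAIM (what is proved, stated in full; the proofs are below) =====
def Claim_equal_leftarm : Prop := ∀ (list : List Int), Dom_leftarm list → Pre_leftarm list → Spec_leftarm list (leftarm list)

-- ===== LEMMAS AND PROOFS =====

-- the loop conserves total length: elements only move from the list to templist
theorem leftarmLoop_len (hold : Int) (l tl : List Int) :
    (leftarmLoop hold l tl).1.length + (leftarmLoop hold l tl).2.length = l.length + tl.length := by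
  induction l, tl using leftarmLoop.induct hold with
  | case1 tl => simp [leftarmLoop]
  | case2 a l tl h ih => rw [leftarmLoop, if_pos h]; simp [ih]; omega
  | case3 a l tl h hlast ih =>
      rw [leftarmLoop, if_neg h, if_pos hlast]
      simp only [ih, List.length_dropLast, List.length_append, List.length_cons,
        List.length_nil]
      omega
  | case4 a l tl h hlast => rw [leftarmLoop, if_neg h, if_neg hlast]

-- the loop consumes the whole list iff every element is ≤ hold
theorem leftarmLoop_empty_iff (hold : Int) (l tl : List Int) :
    (leftarmLoop hold l tl).1 = [] ↔ ∀ x ∈ l, x ≤ hold := by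
  induction l, tl using leftarmLoop.induct hold with
  | case1 tl => simp [leftarmLoop]
  | case2 a l tl h ih =>
      rw [leftarmLoop, if_pos h, ih]
      constructor
      · intro hall x hx
        rcases List.mem_cons.mp hx with rfl | hx
        · exact h
        · exact hall x hx
      · intro hall x hx; exact hall x (List.mem_cons_of_mem _ hx)
  | case3 a l tl h hlast ih =>
      rw [leftarmLoop, if_neg h, if_pos hlast, ih]
      constructor
      · intro hall x hx
        by_cases hd : x ∈ (a :: l).dropLast
        · exact hall x hd
        · have hx' : x = (a :: l).getLast (by simp) := by
            have hsplit := List.dropLast_append_getLast (l := a :: l) (by simp)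
            rw [← hsplit] at hx
            rcases List.mem_append.mp hx with h1 | h2
            · exact absurd h1 hd
            · simpa using h2
          rw [hx']; exact hlast
      · intro hall x hx
        exact hall x ((List.dropLast_sublist _).mem hx)
  | case4 a l tl h hlast =>
      rw [leftarmLoop, if_neg h, if_neg hlast]
      constructor
      · intro hc; exact absurd hc (by simp)
      · intro hall; exact absurd (hall a (by simp)) (by omega)

-- ===== VERDICT (by name: the statement is the Claim_ definition above) =====
theorem leftarm_spec : Claim_equal_leftarm := by
  intro list _ hpre
  match list with
  | [] => exact absurd rfl hpre
  | hold :: rest =>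
    unfold Spec_leftarm leftarm leftarm_alt
    show (if ((hold :: rest).length == (leftarmLoop hold rest [hold]).2.length) = true then (1 : Int) else 0)
        = if ((hold :: rest).all fun x => decide (x ≤ hold)) = true then 1 else 0
    have hlen := leftarmLoop_len hold rest [hold]
    have hiff := leftarmLoop_empty_iff hold rest [hold]
    by_cases hall : ∀ x ∈ rest, x ≤ hold
    · have h1 : (leftarmLoop hold rest [hold]).1 = [] := hiff.mpr hall
      have h2 : (leftarmLoop hold rest [hold]).2.length = rest.length + 1 := by
        rw [h1] at hlen; simpa using hlen
      simp only [h2, List.length_cons, beq_self_eq_true, if_pos]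
      rw [if_pos]
      simp only [List.all_eq_true, decide_eq_true_eq]
      intro x hx
      rcases List.mem_cons.mp hx with rfl | hx
      · exact le_refl _
      · exact hall x hx
    · have h1 : (leftarmLoop hold rest [hold]).1 ≠ [] := fun hc => hall (hiff.mp hc)
      rw [if_neg, if_neg]
      · simp only [List.all_eq_true, decide_eq_true_eq]
        intro hc
        exact hall fun x hx => hc x (List.mem_cons_of_mem _ hx)
      · have h0 : (leftarmLoop hold rest [hold]).1.length ≠ 0 := by
          simpa [List.length_eq_zero_iff] using h1
        simp only [List.length_cons, beq_iff_eq]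
        simp only [List.length_cons, List.length_nil] at hlen
        omega
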